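-- pv_equiv track=rewrite | github.com/psymichaelzhu/VLM_selective_attention | script/validate_attention.py | resolve_attention_configs
-- ===== SOURCE A (Python) =====
-- def resolve_attention_configs(metrics_cfg: list) -> dict:
--     """
--     Extract the first attention_map and attention_rollout metric configs.
--
--     Returns a dict with keys 'attention_map' and/or 'attention_rollout',
--     each holding the raw config dict from setups.yml.
--
--     If neither is present, raises ValueError — this script needs at least one.
--     """
--     resolved = {}
--     for m in metrics_cfg:
--         metric = m["metric"]
--         if metric == "attention_map" and "attention_map" not in resolved:
--             resolved["attention_map"] = m
--         elif metric == "attention_rollout" and "attention_rollout" not in resolved: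
--             resolved["attention_rollout"] = m
--         if len(resolved) == 2:
--             break
--
--     if not resolved:
--         raise ValueError(
--             "No attention_map or attention_rollout metrics found in setup config. "
--             "This script requires at least one attention metric to be configured."
--         )
--     return resolved
-- ===== SOURCE B (Python) =====
-- def resolve_attention_configs(metrics_cfg: list) -> dict:
--     """Find the first attention metric config, then look for the other kind after it."""
--     for i, m in enumerate(metrics_cfg):
--         key = m["metric"]
--         if key in ("attention_map", "attention_rollout"):
--             other = "attention_rollout" if key == "attention_map" else "attention_map"
--             partner = next((x for x in metrics_cfg[i + 1:] if x["metric"] == other), None)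
--             return {key: m, other: partner} if partner is not None else {key: m}
--     raise ValueError(
--         "No attention_map or attention_rollout metrics found in setup config. "
--         "This script requires at least one attention metric to be configured."
--     )
-- ===== Notes on version B (the rewrite author's own statement) =====
-- stated objective: alternative
-- what changed: Instead of A's accumulator-dict scan with membership tests and an early break, B locates the first attention metric and then searches the remaining configs for the complementary metric, returning the one- or two-entry dict directly; Pre_ excludes the inputs where A raises (KeyError on a config without a 'metric' key reached before both metrics are found, or ValueError when neither attention metric is present).
import Mathlib
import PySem

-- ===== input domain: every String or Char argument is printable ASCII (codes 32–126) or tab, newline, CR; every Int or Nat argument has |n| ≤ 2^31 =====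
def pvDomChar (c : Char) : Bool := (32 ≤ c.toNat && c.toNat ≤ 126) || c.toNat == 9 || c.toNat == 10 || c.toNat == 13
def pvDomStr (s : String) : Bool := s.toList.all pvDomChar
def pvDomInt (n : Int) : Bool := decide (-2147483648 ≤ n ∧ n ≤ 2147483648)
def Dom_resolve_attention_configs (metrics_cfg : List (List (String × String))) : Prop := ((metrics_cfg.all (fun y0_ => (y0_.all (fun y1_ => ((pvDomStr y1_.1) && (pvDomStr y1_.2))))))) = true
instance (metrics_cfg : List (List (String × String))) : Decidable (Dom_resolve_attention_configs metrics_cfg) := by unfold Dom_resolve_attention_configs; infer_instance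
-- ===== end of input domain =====

-- B locates the first attention metric and then searches the remaining configs for the
-- complementary one, instead of A's accumulator-dict scan with membership tests and break.


-- ===== PORT A =====
-- m["metric"]: first-match lookup; KeyError (missing key) is excluded by Pre_, the port
-- reads "" there (a value that matches neither branch, exact wherever Pre_ holds).
def pvMetricOf (m : List (String × String)) : String := (List.lookup "metric" m).getD ""

-- the for-loop of A, with `resolved` as accumulator and `break` as early return
def pvAGo : List (List (String × String)) → PySem.Dict String (List (String × String)) → PySem.Dict String (List (String × String))
  | [], resolved => resolved
  | m :: rest, resolved =>
    let metric := pvMetricOf m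
    let r :=
      if metric == "attention_map" && !(resolved.contains "attention_map") then
        resolved.insert "attention_map" m
      else if metric == "attention_rollout" && !(resolved.contains "attention_rollout") then
        resolved.insert "attention_rollout" m
      else resolved
    if r.size == 2 then r else pvAGo rest r

-- `raise ValueError` when resolved is empty lies outside Pre_; the port returns [] there.
def resolve_attention_configs (metrics_cfg : List (List (String × String))) : List (String × List (String × String)) :=
  (pvAGo metrics_cfg PySem.Dict.empty).items

-- ===== PORT B =====
-- next((x for x in rest if x["metric"] == other), None)
def pvFindMetric (key : String) : List (List (String × String)) → Option (List (String × String))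
  | [] => none
  | m :: rest => if pvMetricOf m == key then some m else pvFindMetric key rest

-- B's for-loop: enumerate is used only to slice off the already-visited prefix, which the
-- structural recursion provides as `rest`; the raise on falling off the loop is outside Pre_.
def resolve_attention_configs_alt : List (List (String × String)) → List (String × List (String × String))
  | [] => []
  | m :: rest =>
    let key := pvMetricOf m
    if key == "attention_map" || key == "attention_rollout" then
      let other := if key == "attention_map" then "attention_rollout" else "attention_map"
      match pvFindMetric other rest with
      | some partner => [(key, m), (other, partner)]
      | none => [(key, m)]
    else resolve_attention_configs_alt rest

-- ===== PRECONDITION & SPEC =====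
-- Pre_ excludes exactly the inputs where Python A raises: a KeyError when the scan reaches a
-- config without a "metric" key before both metrics are found, and the ValueError when no
-- attention_map/attention_rollout config exists. (B raises the same exceptions on the same inputs.)
def Pre_resolve_attention_configs (metrics_cfg : List (List (String × String))) : Prop :=
  let pfx := metrics_cfg.takeWhile (fun m => (List.lookup "metric" m).isSome)
  let metrics := pfx.map pvMetricOf
  ("attention_map" ∈ metrics ∧ "attention_rollout" ∈ metrics) ∨
  (pfx.length = metrics_cfg.length ∧ ("attention_map" ∈ metrics ∨ "attention_rollout" ∈ metrics))
instance (metrics_cfg : List (List (String × String))) : Decidable (Pre_resolve_attention_configs metrics_cfg) := by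
  unfold Pre_resolve_attention_configs; infer_instance

def pvWitness_resolve_attention_configs : (List (List (String × String))) :=
  [[("metric", "attention_rollout")], [("metric", "attention_map")]]

def Spec_resolve_attention_configs (metrics_cfg : List (List (String × String))) (out : List (String × List (String × String))) : Prop := out = resolve_attention_configs_alt metrics_cfg
instance (metrics_cfg : List (List (String × String))) (out : List (String × List (String × String))) : Decidable (Spec_resolve_attention_configs metrics_cfg out) := by unfold Spec_resolve_attention_configs; infer_instance

-- ===== CLAIM (what is proved, stated in full; the proofs are below) =====
def Claim_equal_resolve_attention_configs : Prop := ∀ (metrics_cfg : List (List (String × String))), Dom_resolve_attention_configs metrics_cfg → Pre_resolve_attention_configs metrics_cfg → Spec_resolve_attention_configs metrics_cfg (resolve_attention_configs metrics_cfg)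

-- ===== LEMMAS AND PROOFS =====

-- A's loop from the state {attention_map: x}: it skips everything until the first
-- attention_rollout config, which it appends and breaks on.
theorem pvAGo_am (cfg : List (List (String × String))) : ∀ (x : List (String × String)),
    (pvAGo cfg (PySem.Dict.mk [("attention_map", x)])).items =
      ("attention_map", x) ::
        (match pvFindMetric "attention_rollout" cfg with
          | some p => [("attention_rollout", p)] | none => []) := by
  induction cfg with
  | nil => intro x; simp [pvAGo, pvFindMetric]
  | cons m rest ih =>
    intro x
    by_cases h : pvMetricOf m = "attention_rollout"
    · simp [pvAGo, pvFindMetric, h, PySem.Dict.contains, PySem.Dict.insert, PySem.Dict.size]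
    · simp only [pvAGo, pvFindMetric]
      have hb : (pvMetricOf m == "attention_rollout") = false := by simpa using h
      simp only [hb, Bool.false_and]
      by_cases hm : pvMetricOf m = "attention_map" <;>
        simp [hm, PySem.Dict.contains, PySem.Dict.size, ih x]

-- symmetric, from the state {attention_rollout: x}
theorem pvAGo_ar (cfg : List (List (String × String))) : ∀ (x : List (String × String)),
    (pvAGo cfg (PySem.Dict.mk [("attention_rollout", x)])).items =
      ("attention_rollout", x) ::
        (match pvFindMetric "attention_map" cfg with
          | some p => [("attention_map", p)] | none => []) := by
  induction cfg with
  | nil => intro x; simp [pvAGo, pvFindMetric]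
  | cons m rest ih =>
    intro x
    by_cases h : pvMetricOf m = "attention_map"
    · simp [pvAGo, pvFindMetric, h, PySem.Dict.contains, PySem.Dict.insert, PySem.Dict.size]
    · simp only [pvAGo, pvFindMetric]
      have hb : (pvMetricOf m == "attention_map") = false := by simpa using h
      simp only [hb, Bool.false_and]
      by_cases hm : pvMetricOf m = "attention_rollout" <;>
        simp [hm, PySem.Dict.contains, PySem.Dict.size, ih x]

-- the unconditional equality of the two ports
theorem pvPortsAgree (cfg : List (List (String × String))) :
    resolve_attention_configs cfg = resolve_attention_configs_alt cfg := by
  induction cfg with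
  | nil => rfl
  | cons m rest ih =>
    by_cases hm : pvMetricOf m = "attention_map"
    · simp [resolve_attention_configs, resolve_attention_configs_alt, pvAGo, hm,
        PySem.Dict.contains, PySem.Dict.empty, PySem.Dict.insert, PySem.Dict.size]
      rw [pvAGo_am rest m]
      cases pvFindMetric "attention_rollout" rest <;> rfl
    · by_cases hr : pvMetricOf m = "attention_rollout"
      · simp [resolve_attention_configs, resolve_attention_configs_alt, pvAGo, hr,
          PySem.Dict.contains, PySem.Dict.empty, PySem.Dict.insert, PySem.Dict.size]
        rw [pvAGo_ar rest m]
        cases pvFindMetric "attention_map" rest <;> rfl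
      · simp [resolve_attention_configs, resolve_attention_configs_alt, pvAGo, hm, hr,
          PySem.Dict.contains, PySem.Dict.empty, PySem.Dict.size] at ih ⊢
        exact ih

-- ===== VERDICT (by name: the statement is the Claim_ definition above) =====
theorem resolve_attention_configs_spec : Claim_equal_resolve_attention_configs := by
  intro cfg _ _
  unfold Spec_resolve_attention_configs
  exact pvPortsAgree cfg
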